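-- pv_equiv track=rewrite | github.com/pypi-data/pypi-mirror-275 | packages/number2text/number2text-0.0.1.tar.gz/number2text-0.0.1/number2text/lang/is.py | _convert_three_digits
-- ===== SOURCE A (Python) =====
-- _ones= ['', 'einn', 'tveir', 'þrír', 'fjórir', 'fimm', 'sex', 'sjö', 'átta', 'níu']
--
-- _teens = ['tíu', 'ellefu', 'tólf', 'þrettán', 'fjórtán', 'fimmtán', 'sextán', 'sautján', 'átján', 'nítján']
--
-- _tens = ['', '', 'tuttugu', 'þrjátíu', 'fjörutíu', 'fimmtíu', 'sextíu', 'sjötíu', 'áttatíu', 'níutíu']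
--
-- _hundreds = ['', 'eitt hundrað', 'tvö hundruð', 'þrjú hundruð', 'fjögur hundruð', 'fimm hundruð', 'sex hundruð', 'sjö hundruð', 'átta hundruð', 'níu hundruð']
--
-- def _convert_three_digits(number):
--     if number < 10:
--         return _ones[number]
--     elif number < 20:
--         return _teens[number - 10]
--     elif number < 100:
--         tens, ones = divmod(number, 10)
--         if ones == 0:
--             return _tens[tens]
--         else:
--             return _tens[tens] + ' og ' + _ones[ones]
--     else:
--         hundreds, remainder = divmod(number, 100)
--         if remainder == 0:
--             return _hundreds[hundreds]
--         else:
--             return _hundreds[hundreds] + ' og ' + _convert_three_digits(remainder)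
-- ===== SOURCE B (Python) =====
-- _ones= ['', 'einn', 'tveir', 'þrír', 'fjórir', 'fimm', 'sex', 'sjö', 'átta', 'níu']
--
-- _teens = ['tíu', 'ellefu', 'tólf', 'þrettán', 'fjórtán', 'fimmtán', 'sextán', 'sautján', 'átján', 'nítján']
--
-- _tens = ['', '', 'tuttugu', 'þrjátíu', 'fjörutíu', 'fimmtíu', 'sextíu', 'sjötíu', 'áttatíu', 'níutíu']
--
-- _hundreds = ['', 'eitt hundrað', 'tvö hundruð', 'þrjú hundruð', 'fjögur hundruð', 'fimm hundruð', 'sex hundruð', 'sjö hundruð', 'átta hundruð', 'níu hundruð']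
--
-- def _convert_three_digits(number):
--     # flat assembly: collect word fragments, join once with ' og '
--     if number < 10:
--         return _ones[number]
--     if number < 20:
--         return _teens[number - 10]
--     parts = []
--     n = number
--     if n >= 100:
--         parts.append(_hundreds[n // 100])
--         n %= 100
--     if 1 <= n <= 9:
--         parts.append(_ones[n])
--     elif 10 <= n <= 19:
--         parts.append(_teens[n - 10])
--     elif n >= 20:
--         parts.append(_tens[n // 10])
--         if n % 10:
--             parts.append(_ones[n % 10])
--     return ' og '.join(parts)
-- ===== Notes on version B (the rewrite author's own statement) =====
-- stated objective: alternative
-- what changed: Replaces A's one-level recursion (hundreds prefix + recursive call on the remainder) by a flat single-pass assembly that collects word fragments in a list and joins them once with ' og '.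
import Mathlib
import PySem

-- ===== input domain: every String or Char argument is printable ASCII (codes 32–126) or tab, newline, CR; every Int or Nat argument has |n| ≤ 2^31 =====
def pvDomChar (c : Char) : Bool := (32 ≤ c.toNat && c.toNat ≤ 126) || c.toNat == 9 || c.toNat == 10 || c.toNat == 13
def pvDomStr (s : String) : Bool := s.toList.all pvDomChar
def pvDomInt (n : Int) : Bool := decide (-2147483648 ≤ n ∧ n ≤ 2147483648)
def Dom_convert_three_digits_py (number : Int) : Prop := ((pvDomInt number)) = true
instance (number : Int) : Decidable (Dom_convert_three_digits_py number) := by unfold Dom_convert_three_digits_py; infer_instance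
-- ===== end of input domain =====

-- B assembles the answer as a flat list of fragments joined with ' og ' instead of A's recursion; same return value everywhere both Pythons return.

-- ===== PORT A =====
def ones_py : List String := ["", "einn", "tveir", "þrír", "fjórir", "fimm", "sex", "sjö", "átta", "níu"]
def teens_py : List String := ["tíu", "ellefu", "tólf", "þrettán", "fjórtán", "fimmtán", "sextán", "sautján", "átján", "nítján"]
def tens_py : List String := ["", "", "tuttugu", "þrjátíu", "fjörutíu", "fimmtíu", "sextíu", "sjötíu", "áttatíu", "níutíu"]
def hundreds_py : List String := ["", "eitt hundrað", "tvö hundruð", "þrjú hundruð", "fjögur hundruð", "fimm hundruð", "sex hundruð", "sjö hundruð", "átta hundruð", "níu hundruð"]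

-- list indexing xs[i] is ported with pyGetD; Pre_ restricts to the inputs where Python does not raise IndexError
def convert_three_digits_py (number : Int) : String :=
  if number < 10 then
    PySem.List.pyGetD ones_py number ""
  else if number < 20 then
    PySem.List.pyGetD teens_py (number - 10) ""
  else if _h : number < 100 then
    let tens := PySem.Int.floordiv number 10
    let ones := PySem.Int.mod number 10
    if ones = 0 then PySem.List.pyGetD tens_py tens ""
    else PySem.List.pyGetD tens_py tens "" ++ " og " ++ PySem.List.pyGetD ones_py ones ""
  else
    let hundreds := PySem.Int.floordiv number 100
    let remainder := PySem.Int.mod number 100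
    if remainder = 0 then PySem.List.pyGetD hundreds_py hundreds ""
    else PySem.List.pyGetD hundreds_py hundreds "" ++ " og " ++ convert_three_digits_py remainder
termination_by number.toNat
decreasing_by
  have h1 := PySem.Int.mod_nonneg number (b := 100) (by norm_num)
  have h2 := PySem.Int.mod_lt number (b := 100) (by norm_num)
  omega

-- ===== PORT B =====
def convert_three_digits_py_alt (number : Int) : String :=
  if number < 10 then
    PySem.List.pyGetD ones_py number ""
  else if number < 20 then
    PySem.List.pyGetD teens_py (number - 10) ""
  else
    let st :=
      if number ≥ 100 then
        ([PySem.List.pyGetD hundreds_py (PySem.Int.floordiv number 100) ""],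
         PySem.Int.mod number 100)
      else ([], number)
    let parts := st.1
    let n := st.2
    let parts :=
      if 1 ≤ n ∧ n ≤ 9 then
        parts ++ [PySem.List.pyGetD ones_py n ""]
      else if 10 ≤ n ∧ n ≤ 19 then
        parts ++ [PySem.List.pyGetD teens_py (n - 10) ""]
      else if n ≥ 20 then
        let p := parts ++ [PySem.List.pyGetD tens_py (PySem.Int.floordiv n 10) ""]
        if PySem.Int.mod n 10 ≠ 0 then p ++ [PySem.List.pyGetD ones_py (PySem.Int.mod n 10) ""]
        else p
      else parts
    PySem.Str.join " og " parts

-- ===== PRECONDITION & SPEC =====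
-- Pre_ excludes exactly the inputs where the Python A raises IndexError (number ≤ -11 or number ≥ 1000); B raises there too.
def Pre_convert_three_digits_py (number : Int) : Prop := -10 ≤ number ∧ number < 1000
instance (number : Int) : Decidable (Pre_convert_three_digits_py number) := by unfold Pre_convert_three_digits_py; infer_instance
def pvWitness_convert_three_digits_py : Int := (123)
def Spec_convert_three_digits_py (number : Int) (out : String) : Prop := out = convert_three_digits_py_alt number
instance (number : Int) (out : String) : Decidable (Spec_convert_three_digits_py number out) := by unfold Spec_convert_three_digits_py; infer_instance

-- ===== CLAIM (what is proved, stated in full; the proofs are below) =====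
def Claim_equal_convert_three_digits_py : Prop := ∀ (number : Int), Dom_convert_three_digits_py number → Pre_convert_three_digits_py number → Spec_convert_three_digits_py number (convert_three_digits_py number)

-- ===== LEMMAS AND PROOFS =====
theorem join_single (a : String) : PySem.Str.join " og " [a] = a :=
  String.toList_inj.mp (by simp [PySem.Str.toList_join, PySem.Chars.join_singleton])
theorem join_pair (a b : String) : PySem.Str.join " og " [a, b] = a ++ " og " ++ b :=
  String.toList_inj.mp (by
    simp [PySem.Str.toList_join, PySem.Chars.join_cons_cons, PySem.Chars.join_singleton])
theorem join_triple (a b c : String) :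
    PySem.Str.join " og " [a, b, c] = a ++ " og " ++ (b ++ " og " ++ c) :=
  String.toList_inj.mp (by
    simp [PySem.Str.toList_join, PySem.Chars.join_cons_cons, PySem.Chars.join_singleton])

-- A's recursive call lands on 0 ≤ r < 100; this characterises A there in the shapes the proof needs
theorem portA_small (r : Int) (_hr0 : 0 ≤ r) (hr : r < 100) :
    convert_three_digits_py r =
      if r < 10 then PySem.List.pyGetD ones_py r ""
      else if r < 20 then PySem.List.pyGetD teens_py (r - 10) ""
      else if PySem.Int.mod r 10 = 0 then PySem.List.pyGetD tens_py (PySem.Int.floordiv r 10) ""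
      else PySem.List.pyGetD tens_py (PySem.Int.floordiv r 10) "" ++ " og " ++
           PySem.List.pyGetD ones_py (PySem.Int.mod r 10) "" := by
  rw [convert_three_digits_py]
  by_cases h1 : r < 10
  · simp [h1]
  · by_cases h2 : r < 20
    · simp [h1, h2]
    · simp [h1, h2, hr]

-- ===== VERDICT (by name: the statement is the Claim_ definition above) =====
theorem convert_three_digits_py_spec : Claim_equal_convert_three_digits_py := by
  intro n _ _
  show convert_three_digits_py n = convert_three_digits_py_alt n
  by_cases h1 : n < 10
  · rw [convert_three_digits_py, convert_three_digits_py_alt]; simp [h1]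
  · by_cases h2 : n < 20
    · rw [convert_three_digits_py, convert_three_digits_py_alt]; simp [h1, h2]
    · by_cases h3 : n < 100
      · -- 20 ≤ n < 100: no hundreds fragment
        rw [convert_three_digits_py, convert_three_digits_py_alt]
        by_cases ho : PySem.Int.mod n 10 = 0
        · simp [h1, h2, h3, join_single,
                show (10 : Int) ∣ n from (PySem.Int.mod_eq_zero_iff_dvd n 10).mp ho,
                show ¬ n ≥ 100 by omega,
                show ¬ (1 ≤ n ∧ n ≤ 9) by omega, show ¬ (10 ≤ n ∧ n ≤ 19) by omega,
                show n ≥ 20 by omega]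
        · simp [h1, h2, h3, join_pair,
                show ¬ (10 : Int) ∣ n from fun h => ho ((PySem.Int.mod_eq_zero_iff_dvd n 10).mpr h),
                show ¬ n ≥ 100 by omega,
                show ¬ (1 ≤ n ∧ n ≤ 9) by omega, show ¬ (10 ≤ n ∧ n ≤ 19) by omega,
                show n ≥ 20 by omega]
      · -- n ≥ 100
        have hr0 := PySem.Int.mod_nonneg n (b := 100) (by norm_num)
        have hr1 := PySem.Int.mod_lt n (b := 100) (by norm_num)
        set r := PySem.Int.mod n 100 with hrdef
        have hre : n % 100 = r := (PySem.Int.mod_eq_emod_of_pos (a := n) (b := 100) (by norm_num)).symm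
        have hA : convert_three_digits_py n =
            if r = 0 then PySem.List.pyGetD hundreds_py (PySem.Int.floordiv n 100) ""
            else PySem.List.pyGetD hundreds_py (PySem.Int.floordiv n 100) "" ++ " og " ++
                 convert_three_digits_py r := by
          rw [convert_three_digits_py]; simp [h1, h2, h3, hre]
        rw [hA, convert_three_digits_py_alt, portA_small r hr0 hr1]
        by_cases hz : r = 0
        · simp [h1, h2, hz, join_single, show n ≥ 100 by omega, hre]
        · by_cases c1 : r < 10
          · simp [h1, h2, hz, c1, join_pair, show n ≥ 100 by omega, hre,
                  show 1 ≤ r ∧ r ≤ 9 by omega]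
          · by_cases c2 : r < 20
            · simp [h1, h2, hz, c1, c2, join_pair, show n ≥ 100 by omega, hre,
                    show ¬ (1 ≤ r ∧ r ≤ 9) by omega, show 10 ≤ r ∧ r ≤ 19 by omega]
            · by_cases ho : PySem.Int.mod r 10 = 0
              · simp [h1, h2, hz, c1, c2, join_pair,
                      show (10 : Int) ∣ r from (PySem.Int.mod_eq_zero_iff_dvd r 10).mp ho,
                      show n ≥ 100 by omega, hre,
                      show ¬ (1 ≤ r ∧ r ≤ 9) by omega, show ¬ (10 ≤ r ∧ r ≤ 19) by omega,
                      show r ≥ 20 by omega]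
              · simp [h1, h2, hz, c1, c2, join_triple,
                      show ¬ (10 : Int) ∣ r from fun h => ho ((PySem.Int.mod_eq_zero_iff_dvd r 10).mpr h),
                      show n ≥ 100 by omega, hre,
                      show ¬ (1 ≤ r ∧ r ≤ 9) by omega, show ¬ (10 ≤ r ∧ r ≤ 19) by omega,
                      show r ≥ 20 by omega]
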